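-- pv_equiv track=rewrite | github.com/maccergit/Euler | prob0024 - Lexicogrphic Permutations/04.py | factoradic
-- ===== SOURCE A (Python) =====
-- import math
--
-- def factoradic(n):
--     # find first factorial larger than N
--     fact = 0
--     place = -1
--     while n >= fact:
--         place += 1
--         fact = math.factorial(place)
--     place -= 1
--
--     digits = []
--     while place > 0:
--         fact = math.factorial(place)
--         digits.append(n // fact)
--         n %= fact
--         place -= 1
--     return digits
-- ===== SOURCE B (Python) =====
-- def factoradic(n):
--     m = n
--     digits = []
--     k = 2
--     while m > 0:
--         m, r = divmod(m, k)
--         digits.append(r)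
--         k += 1
--     digits.reverse()
--     return digits
-- ===== Notes on version B (the rewrite author's own statement) =====
-- stated objective: idiomatic
-- what changed: Replaces the factorial-search-then-greedy-division algorithm (which calls math.factorial repeatedly) with the canonical bottom-up successive divmod by an increasing divisor starting at two, building digits least-significant-first and reversing; no factorials are computed.
import Mathlib
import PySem

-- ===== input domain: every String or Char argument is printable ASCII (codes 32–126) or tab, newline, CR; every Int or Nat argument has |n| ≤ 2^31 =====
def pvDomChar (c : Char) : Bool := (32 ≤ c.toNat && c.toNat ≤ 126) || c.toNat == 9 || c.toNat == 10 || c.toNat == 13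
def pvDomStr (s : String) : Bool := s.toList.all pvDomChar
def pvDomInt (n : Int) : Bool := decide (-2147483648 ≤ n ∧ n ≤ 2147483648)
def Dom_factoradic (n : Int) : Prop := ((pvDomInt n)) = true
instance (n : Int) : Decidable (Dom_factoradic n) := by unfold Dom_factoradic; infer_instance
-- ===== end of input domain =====

-- B replaces A's factorial-search-plus-greedy-division with the canonical successive
-- divmod by an increasing divisor starting at two (digits built least-significant-first,
-- then reversed); same return value for every int, no factorials computed (idiomatic).


-- termination helper for the divmod loops: floordiv by j+2 shrinks a positive m
theorem pvShrink (m : Int) (j : Nat) (h : 0 < m) :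
    (PySem.Int.floordiv m ((j : Int) + 2)).toNat < m.toNat := by
  have hj : (0:Int) < (j : Int) + 2 := by positivity
  rw [PySem.Int.floordiv_eq_ediv_of_pos hj]
  have hr := Int.mul_ediv_add_emod m ((j : Int) + 2)
  have hr0 : 0 ≤ m % ((j : Int) + 2) := Int.emod_nonneg m hj.ne'
  have hq0 : 0 ≤ m / ((j : Int) + 2) := Int.ediv_nonneg h.le hj.le
  have hjq : 0 ≤ (j : Int) * (m / ((j : Int) + 2)) := mul_nonneg (by positivity) hq0
  have hexp : ((j : Int) + 2) * (m / ((j : Int) + 2))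
      = (j : Int) * (m / ((j : Int) + 2)) + 2 * (m / ((j : Int) + 2)) := by ring
  omega

-- ===== PORT A =====
-- math.factorial(place); A only calls it with place ≥ 0, where Nat.factorial is exact
def pvFactI (p : Int) : Int := (Nat.factorial p.toNat : Int)

-- first while loop of A ("find first factorial larger than N"); the fuel argument is
-- only a totality guard — n.toNat + 3 steps always suffice (proved in pvFindPlace_run)
def pvFindPlace (n : Int) : Nat → Int → Int → Int
  | 0, place, _ => place
  | fuel+1, place, fact =>
    if n ≥ fact then pvFindPlace n fuel (place+1) (pvFactI (place+1)) else place

-- second while loop of A: digits.append(n // fact); n %= fact; place -= 1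
def pvDigitsLoop (n : Int) (place : Int) (acc : List Int) : List Int :=
  if h : 0 < place then
    pvDigitsLoop (PySem.Int.mod n (pvFactI place)) (place - 1)
      (acc ++ [PySem.Int.floordiv n (pvFactI place)])
  else acc
termination_by place.toNat
decreasing_by omega

def factoradic (n : Int) : List Int :=
  let place := pvFindPlace n (n.toNat + 3) (-1) 0 - 1
  pvDigitsLoop n place []

-- ===== PORT B =====
-- B's while loop: m, r = divmod(m, k); digits.append(r); k += 1.
-- k is carried as j + 2 (j : Nat): the loop's k ≥ 2 invariant made structural,
-- which gives termination (m strictly decreases under floordiv by j+2 ≥ 2).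
def pvBLoop (m : Int) (j : Nat) (acc : List Int) : List Int :=
  if h : 0 < m then
    pvBLoop (PySem.Int.floordiv m ((j : Int) + 2)) (j+1)
      (acc ++ [PySem.Int.mod m ((j : Int) + 2)])
  else acc
termination_by m.toNat
decreasing_by exact pvShrink m j h

def factoradic_alt (n : Int) : List Int :=
  (pvBLoop n 0 []).reverse

-- ===== PRECONDITION & SPEC =====
def Spec_factoradic (n : Int) (out : List Int) : Prop := out = factoradic_alt n
instance (n : Int) (out : List Int) : Decidable (Spec_factoradic n out) := by unfold Spec_factoradic; infer_instance

-- ===== CLAIM (what is proved, stated in full; the proofs are below) =====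
def Claim_equal_factoradic : Prop := ∀ (n : Int), Dom_factoradic n → Spec_factoradic n (factoradic n)

-- ===== LEMMAS AND PROOFS =====

-- (p! : Int)
def pvFct (p : Nat) : Int := (Nat.factorial p : Int)

-- A's digit list, most significant first: for places p, p-1, …, 1
def pvMsb : Nat → Int → List Int
  | 0, _ => []
  | p+1, n => PySem.Int.floordiv n (pvFct (p+1)) :: pvMsb p (PySem.Int.mod n (pvFct (p+1)))

-- B's digit list, least significant first, divisors j+2, j+3, …
def pvBd (m : Int) (j : Nat) : List Int :=
  if h : 0 < m then
    PySem.Int.mod m ((j : Int) + 2) :: pvBd (PySem.Int.floordiv m ((j : Int) + 2)) (j+1)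
  else []
termination_by m.toNat
decreasing_by exact pvShrink m j h

-- exactly c least-significant digits, divisors j+2, j+3, …
def pvLsb : Nat → Nat → Int → List Int
  | _, 0, _ => []
  | j, c+1, m => PySem.Int.mod m ((j : Int) + 2) :: pvLsb (j+1) c (PySem.Int.floordiv m ((j : Int) + 2))

-- product of the c divisors starting at j+2: (j+2)(j+3)…(j+c+1)
def pvPF : Nat → Nat → Int
  | _, 0 => 1
  | j, c+1 => ((j : Int) + 2) * pvPF (j+1) c

theorem pvPF_pos (j c : Nat) : 0 < pvPF j c := by
  induction c generalizing j with
  | zero => simp [pvPF]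
  | succ c ih => simpa [pvPF] using mul_pos (by positivity) (ih (j+1))

theorem pvPF_succ_right (c j : Nat) : pvPF j (c+1) = pvPF j c * ((j : Int) + (c : Int) + 2) := by
  induction c generalizing j with
  | zero => simp only [pvPF]; push_cast; ring
  | succ c ih =>
    rw [show pvPF j (c+1+1) = ((j : Int)+2) * pvPF (j+1) (c+1) from rfl, ih (j+1)]
    rw [show pvPF j (c+1) = ((j : Int)+2) * pvPF (j+1) c from rfl]
    push_cast; ring

theorem pvPF_zero_eq_fct (c : Nat) : pvPF 0 c = pvFct (c+1) := by
  induction c with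
  | zero => simp [pvPF, pvFct, Nat.factorial]
  | succ c ih =>
    rw [pvPF_succ_right, ih]
    unfold pvFct
    rw [show c + 1 + 1 = (c + 1) + 1 from rfl, Nat.factorial_succ (c+1)]
    push_cast; ring

theorem pvFct_pos (p : Nat) : 0 < pvFct p := by
  simpa [pvFct] using Int.natCast_pos.mpr (Nat.factorial_pos p)

theorem pvFct_mono {p q : Nat} (h : p ≤ q) : pvFct p ≤ pvFct q := by
  simpa [pvFct] using Int.ofNat_le.mpr (Nat.factorial_le h)

-- A's second loop computes pvMsb
theorem pvDigitsLoop_eq (p : Nat) : ∀ (n : Int) (acc : List Int),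
    pvDigitsLoop n (p : Int) acc = acc ++ pvMsb p n := by
  induction p with
  | zero => intro n acc; rw [pvDigitsLoop]; simp [pvMsb]
  | succ p ih =>
    intro n acc
    rw [pvDigitsLoop]
    have hpos : (0:Int) < ((p+1 : Nat) : Int) := by push_cast; omega
    rw [dif_pos hpos]
    have hf : pvFactI ((p+1 : Nat) : Int) = pvFct (p+1) := by simp [pvFactI, pvFct]
    have hm : ((p+1 : Nat) : Int) - 1 = (p : Int) := by push_cast; ring
    rw [hf, hm, ih]
    simp [pvMsb]

-- B's loop computes pvBd
theorem pvBLoop_eq (m : Int) (j : Nat) (acc : List Int) :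
    pvBLoop m j acc = acc ++ pvBd m j := by
  induction m, j, acc using pvBLoop.induct with
  | case1 m j acc h ih =>
    rw [pvBLoop, dif_pos h, ih]
    conv_rhs => rw [pvBd, dif_pos h]
    simp
  | case2 m j acc h =>
    rw [pvBLoop, dif_neg h]
    conv_rhs => rw [pvBd, dif_neg h]
    simp

-- pvBd produces exactly c+1 digits when pvPF j c ≤ m < pvPF j (c+1), and they are pvLsb's
theorem pvBd_eq_lsb (c : Nat) : ∀ (j : Nat) (m : Int),
    pvPF j c ≤ m → m < pvPF j (c+1) → pvBd m j = pvLsb j (c+1) m := by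
  induction c with
  | zero =>
    intro j m h1 h2
    have hm : 0 < m := lt_of_lt_of_le (pvPF_pos j 0) h1
    have hj : (0:Int) < (j : Int) + 2 := by positivity
    rw [pvBd, dif_pos hm]
    have hdiv : PySem.Int.floordiv m ((j : Int) + 2) = 0 := by
      rw [PySem.Int.floordiv_eq_ediv_of_pos hj]
      have h2' : m < (j : Int) + 2 := by simpa [pvPF] using h2
      exact Int.ediv_eq_zero_of_lt hm.le h2'
    rw [hdiv]
    rw [show pvBd 0 (j+1) = [] from by rw [pvBd]; simp]
    simp [pvLsb]
  | succ c ih =>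
    intro j m h1 h2
    have hm : 0 < m := lt_of_lt_of_le (pvPF_pos j (c+1)) h1
    have hj : (0:Int) < (j : Int) + 2 := by positivity
    rw [pvBd, dif_pos hm]
    have hP1 : pvPF j (c+1) = ((j : Int)+2) * pvPF (j+1) c := rfl
    have hP2 : pvPF j (c+2) = ((j : Int)+2) * pvPF (j+1) (c+1) := rfl
    have hlo : pvPF (j+1) c ≤ PySem.Int.floordiv m ((j : Int) + 2) := by
      rw [PySem.Int.le_floordiv_iff_mul_le hj]
      calc pvPF (j+1) c * ((j:Int)+2) = ((j:Int)+2) * pvPF (j+1) c := by ring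
        _ ≤ m := by rw [← hP1]; exact h1
    have hhi : PySem.Int.floordiv m ((j : Int) + 2) < pvPF (j+1) (c+1) := by
      rw [PySem.Int.floordiv_lt_iff_lt_mul hj]
      calc m < pvPF j (c+2) := h2
        _ = pvPF (j+1) (c+1) * ((j:Int)+2) := by rw [hP2]; ring
    rw [ih (j+1) _ hlo hhi]
    have : ((j+1 : Nat) : Int) + 2 = (j : Int) + 3 := by push_cast; ring
    simp [pvLsb]

-- splitting off the most significant of c+1 digits
theorem pvLsb_split (c : Nat) : ∀ (j : Nat) (n : Int),
    0 ≤ n → n < pvPF j (c+1) →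
    pvLsb j (c+1) n
      = pvLsb j c (PySem.Int.mod n (pvPF j c)) ++ [PySem.Int.floordiv n (pvPF j c)] := by
  induction c with
  | zero =>
    intro j n h0 h1
    have hj : (0:Int) < (j : Int) + 2 := by positivity
    have h1' : n < (j : Int) + 2 := by simpa [pvPF] using h1
    have hmod : PySem.Int.mod n ((j : Int) + 2) = n := by
      rw [PySem.Int.mod_eq_emod_of_pos hj]; exact Int.emod_eq_of_lt h0 h1'
    have hdiv : PySem.Int.floordiv n 1 = n := by
      rw [PySem.Int.floordiv_eq_ediv_of_pos (by norm_num)]; simp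
    simp [pvLsb, pvPF, hmod]
  | succ c ih =>
    intro j n h0 h1
    have hj : (0:Int) < (j : Int) + 2 := by positivity
    have hQpos : 0 < pvPF (j+1) c := pvPF_pos (j+1) c
    have hPpos : 0 < pvPF j (c+1) := pvPF_pos j (c+1)
    have hP1 : pvPF j (c+1) = ((j : Int)+2) * pvPF (j+1) c := rfl
    have hP2 : pvPF j (c+2) = ((j : Int)+2) * pvPF (j+1) (c+1) := rfl
    set a : Int := (j : Int) + 2 with ha
    set Q : Int := pvPF (j+1) c with hQ
    -- left side: peel the least significant digit, then apply ih to n / a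
    have hd0 : 0 ≤ PySem.Int.floordiv n a := by
      rw [PySem.Int.floordiv_eq_ediv_of_pos hj]; exact Int.ediv_nonneg h0 hj.le
    have hd1 : PySem.Int.floordiv n a < pvPF (j+1) (c+1) := by
      rw [PySem.Int.floordiv_lt_iff_lt_mul hj]
      calc n < pvPF j (c+2) := h1
        _ = pvPF (j+1) (c+1) * a := by rw [hP2]; ring
    have lhs : pvLsb j (c+2) n
        = PySem.Int.mod n a ::
          (pvLsb (j+1) c (PySem.Int.mod (PySem.Int.floordiv n a) Q)
            ++ [PySem.Int.floordiv (PySem.Int.floordiv n a) Q]) := by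
      rw [show pvLsb j (c+2) n = PySem.Int.mod n a :: pvLsb (j+1) (c+1) (PySem.Int.floordiv n a) from rfl]
      rw [ih (j+1) _ hd0 hd1]
    -- right side identities, over ediv/emod
    have hQj : (0:Int) < Q := hQpos
    have e_all := PySem.Int.floordiv_eq_ediv_of_pos (a := n) (b := a*Q) (mul_pos hj hQj)
    -- (i) n % a = (n % (a*Q)) % a
    have id1 : PySem.Int.mod (PySem.Int.mod n (a*Q)) a = PySem.Int.mod n a := by
      rw [PySem.Int.mod_eq_emod_of_pos (mul_pos hj hQj),
          PySem.Int.mod_eq_emod_of_pos hj, PySem.Int.mod_eq_emod_of_pos hj]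
      exact Int.emod_emod_of_dvd n ⟨Q, rfl⟩
    -- (ii) (n % (a*Q)) / a = (n / a) % Q
    have id2 : PySem.Int.floordiv (PySem.Int.mod n (a*Q)) a
        = PySem.Int.mod (PySem.Int.floordiv n a) Q := by
      rw [PySem.Int.mod_eq_emod_of_pos (mul_pos hj hQj),
          PySem.Int.floordiv_eq_ediv_of_pos hj, PySem.Int.floordiv_eq_ediv_of_pos hj,
          PySem.Int.mod_eq_emod_of_pos hQj]
      have h2 : n / a / Q = n / (a*Q) := Int.ediv_ediv_of_nonneg hj.le
      have h3 : (n - a*Q*(n/(a*Q))) / a = n/a - Q*(n/(a*Q)) := by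
        have h4 : n - a*Q*(n/(a*Q)) = n + (-(Q*(n/(a*Q))))*a := by ring
        rw [h4, Int.add_mul_ediv_right _ _ hj.ne']
        ring
      rw [Int.emod_def, h3, Int.emod_def, h2]
    -- (iii) (n / a) / Q = n / (a*Q)
    have id3 : PySem.Int.floordiv (PySem.Int.floordiv n a) Q
        = PySem.Int.floordiv n (a*Q) := by
      rw [PySem.Int.floordiv_eq_ediv_of_pos hj, PySem.Int.floordiv_eq_ediv_of_pos hQj,
          PySem.Int.floordiv_eq_ediv_of_pos (mul_pos hj hQj)]
      exact Int.ediv_ediv_of_nonneg hj.le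
    have rhs : pvLsb j (c+1) (PySem.Int.mod n (pvPF j (c+1)))
          ++ [PySem.Int.floordiv n (pvPF j (c+1))]
        = PySem.Int.mod n a ::
          (pvLsb (j+1) c (PySem.Int.mod (PySem.Int.floordiv n a) Q)
            ++ [PySem.Int.floordiv (PySem.Int.floordiv n a) Q]) := by
      rw [hP1]
      rw [show pvLsb j (c+1) (PySem.Int.mod n (a*Q))
          = PySem.Int.mod (PySem.Int.mod n (a*Q)) a
            :: pvLsb (j+1) c (PySem.Int.floordiv (PySem.Int.mod n (a*Q)) a) from rfl]
      rw [id1, id2, id3]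
      simp
    rw [lhs, rhs]

-- the reverse of A's digit list is B's digit list (of the right length)
theorem pvMsb_reverse (p : Nat) : ∀ (n : Int),
    0 ≤ n → n < pvFct (p+1) → (pvMsb p n).reverse = pvLsb 0 p n := by
  induction p with
  | zero => intro n _ _; simp [pvMsb, pvLsb]
  | succ p ih =>
    intro n h0 h1
    have hfpos : 0 < pvFct (p+1) := pvFct_pos (p+1)
    have hPF : pvPF 0 p = pvFct (p+1) := pvPF_zero_eq_fct p
    have hr0 : 0 ≤ PySem.Int.mod n (pvFct (p+1)) := by
      rw [PySem.Int.mod_eq_emod_of_pos hfpos]; exact Int.emod_nonneg n hfpos.ne'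
    have hr1 : PySem.Int.mod n (pvFct (p+1)) < pvFct (p+1) := by
      rw [PySem.Int.mod_eq_emod_of_pos hfpos]; exact Int.emod_lt_of_pos n hfpos
    have hsplit := pvLsb_split p 0 n h0
      (by rw [show pvPF 0 (p+1) = pvFct (p+2) from pvPF_zero_eq_fct (p+1)]
          exact lt_of_lt_of_le h1 (pvFct_mono (by omega)))
    rw [show pvMsb (p+1) n
        = PySem.Int.floordiv n (pvFct (p+1)) :: pvMsb p (PySem.Int.mod n (pvFct (p+1))) from rfl]
    rw [List.reverse_cons, ih _ hr0 hr1, hsplit, hPF]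

-- factorial dominates: p ≤ p!
theorem pvFct_self_le (p : Nat) : (p : Int) ≤ pvFct p := by
  simpa [pvFct] using Int.ofNat_le.mpr (Nat.self_le_factorial p)

-- the first loop, started anywhere at or below the answer, finds place = p+1
theorem pvFindPlace_run {n : Int} {p : Nat} (hp1 : pvFct p ≤ n) (hp2 : n < pvFct (p+1)) :
    ∀ (fuel q : Nat), q ≤ p + 1 → p + 2 ≤ q + fuel →
      pvFindPlace n fuel (q : Int) (pvFct q) = ((p+1 : Nat) : Int) := by
  intro fuel
  induction fuel with
  | zero => intro q hq hf; omega
  | succ fuel ih =>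
    intro q hq hf
    rw [pvFindPlace]
    by_cases hqp : q ≤ p
    · have hguard : n ≥ pvFct q := le_trans (pvFct_mono hqp) hp1
      rw [if_pos hguard]
      have h1 : ((q : Int) + 1) = ((q+1 : Nat) : Int) := by push_cast; ring
      have h2 : pvFactI ((q : Int) + 1) = pvFct (q+1) := by
        rw [h1]; simp [pvFactI, pvFct]
      rw [h2, h1]
      exact ih (q+1) (by omega) (by omega)
    · have hq1 : q = p + 1 := by omega
      subst hq1
      rw [if_neg (by exact not_le.mpr hp2)]

-- for every n ≥ 1 there is a (unique) place p ≥ 1 with p! ≤ n < (p+1)!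
theorem pvPlace_exists (n : Int) (hn : 1 ≤ n) :
    ∃ p : Nat, 1 ≤ p ∧ pvFct p ≤ n ∧ n < pvFct (p+1) := by
  have hbig : ∃ q : Nat, n < pvFct q := by
    refine ⟨n.toNat + 1, lt_of_lt_of_le ?_ (pvFct_self_le (n.toNat + 1))⟩
    omega
  classical
  let q0 := Nat.find hbig
  have hq0 : n < pvFct q0 := Nat.find_spec hbig
  have hmin : ∀ m < q0, ¬ n < pvFct m := fun m hm => Nat.find_min hbig hm
  have h0 : ¬ n < pvFct 0 := by simp [pvFct, Nat.factorial]; omega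
  have h1 : ¬ n < pvFct 1 := by simp [pvFct, Nat.factorial]; omega
  have hq2 : 2 ≤ q0 := by
    by_contra h
    interval_cases q0 <;> simp_all
  refine ⟨q0 - 1, by omega, ?_, ?_⟩
  · have := hmin (q0 - 1) (by omega)
    omega
  · have : q0 - 1 + 1 = q0 := by omega
    rw [this]; exact hq0

-- ===== VERDICT (by name: the statement is the Claim_ definition above) =====
theorem factoradic_spec : Claim_equal_factoradic := by
  intro n _
  unfold Spec_factoradic factoradic factoradic_alt
  by_cases hn : 1 ≤ n
  · obtain ⟨p, hp1, hle, hlt⟩ := pvPlace_exists n hn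
    -- A's first loop
    have hstart : pvFindPlace n (n.toNat + 3) (-1) 0 = ((p+1 : Nat) : Int) := by
      rw [show n.toNat + 3 = (n.toNat + 2) + 1 from rfl, pvFindPlace,
          if_pos (by omega : n ≥ 0)]
      have h0 : ((-1 : Int) + 1) = ((0 : Nat) : Int) := by norm_num
      have hf : pvFactI ((-1 : Int) + 1) = pvFct 0 := by norm_num [pvFactI, pvFct]
      rw [hf, h0]
      refine pvFindPlace_run hle hlt (n.toNat + 2) 0 (by omega) ?_
      have hpn : (p : Int) ≤ n := le_trans (pvFct_self_le p) hle
      omega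
    rw [hstart]
    have hm1 : ((p+1 : Nat) : Int) - 1 = (p : Int) := by push_cast; ring
    rw [hm1, pvDigitsLoop_eq p n [], pvBLoop_eq n 0 []]
    simp only [List.nil_append]
    -- B's digits: pvBd n 0 = pvLsb 0 p n
    obtain ⟨c, rfl⟩ : ∃ c, p = c + 1 := ⟨p - 1, by omega⟩
    have hbd : pvBd n 0 = pvLsb 0 (c+1) n := by
      refine pvBd_eq_lsb c 0 n ?_ ?_
      · rw [pvPF_zero_eq_fct]; exact hle
      · rw [pvPF_zero_eq_fct]; exact hlt
    rw [hbd, ← pvMsb_reverse (c+1) n (by omega) hlt, List.reverse_reverse]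
  · -- n ≤ 0 : both sides are []
    have hB : pvBLoop n 0 [] = [] := by rw [pvBLoop, dif_neg (by omega)]
    rw [hB]
    by_cases h0 : n = 0
    · subst h0
      have hfp : pvFindPlace 0 (Int.toNat 0 + 3) (-1) 0 = 0 := by decide
      rw [hfp]
      norm_num
      rw [pvDigitsLoop, dif_neg (by norm_num)]
    · have hneg : n < 0 := by omega
      have hfp : pvFindPlace n (n.toNat + 3) (-1) 0 = -1 := by
        rw [show n.toNat + 3 = (n.toNat + 2) + 1 from rfl, pvFindPlace,
            if_neg (by omega : ¬ n ≥ 0)]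
      rw [hfp, pvDigitsLoop, dif_neg (by omega)]
      simp
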